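-- pv_equiv track=rewrite | github.com/eddy176/CIT | Programs/1410/dnasequencer/dnaSequencing.py | findLargestOverlap
-- ===== SOURCE A (Python) =====
-- def strandsAreNotEmpty(strand1, strand2):
--     if len(strand1) > 0 and len(strand2) > 0:
--         return True
--     else:
--         return False
--
-- def strandsAreEqualLengths(strand1, strand2):
--     if len(strand1) == len(strand2):
--         return True
--     else:
--         return False
--
-- def findLargestOverlap(target, candidate):
--     if strandsAreEqualLengths(target, candidate) != True or strandsAreNotEmpty(target, candidate) != True:
--         return -1
--     for i in range(len(target)):                #loop over the length of the target string
--         tarslice = target[i:]                   #slice the target string from i to the end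
--         canslice = candidate[0:len(tarslice)]   #slice the candidate string from the beginning to the length of tarslice
--         if tarslice == canslice:                #compare both slices to see if they match
--             return len(tarslice)                #if they match, return the length of the slices
--     return 0
-- ===== SOURCE B (Python) =====
-- def findLargestOverlap(target, candidate):
--     if len(target) != len(candidate) or len(target) == 0:
--         return -1
--     # KMP prefix function of candidate + sentinel + target; final value is the
--     # length of the longest target-suffix that equals a candidate-prefix.
--     s = candidate + "\x00" + target
--     pi = [0] * len(s)
--     k = 0
--     for i in range(1, len(s)):
--         while k > 0 and s[i] != s[k]:
--             k = pi[k - 1]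
--         if s[i] == s[k]:
--             k += 1
--         pi[i] = k
--     return k
-- ===== Notes on version B (the rewrite author's own statement) =====
-- stated objective: faster
-- what changed: Replaces A's quadratic scan that re-compares a full target-suffix against a candidate-prefix for every start index by a single KMP prefix-function pass over candidate + '\x00' + target, whose final value is the largest overlap length.
import Mathlib
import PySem

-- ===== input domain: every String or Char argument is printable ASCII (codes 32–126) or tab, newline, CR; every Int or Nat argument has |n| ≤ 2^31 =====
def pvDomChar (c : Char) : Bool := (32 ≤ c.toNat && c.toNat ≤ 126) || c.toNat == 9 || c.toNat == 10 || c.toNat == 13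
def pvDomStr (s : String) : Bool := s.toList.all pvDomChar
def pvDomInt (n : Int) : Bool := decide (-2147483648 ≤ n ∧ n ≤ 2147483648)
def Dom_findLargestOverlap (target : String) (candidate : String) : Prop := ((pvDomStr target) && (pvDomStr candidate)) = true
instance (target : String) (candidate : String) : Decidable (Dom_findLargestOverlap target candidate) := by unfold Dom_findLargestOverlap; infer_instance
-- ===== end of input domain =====

-- B replaces A's quadratic suffix-vs-prefix rescan by one KMP prefix-function pass over
-- candidate + '\x00' + target (objective: faster, asymptotic).

-- ===== PORT A =====
def strandsAreNotEmpty (strand1 strand2 : List Char) : Bool :=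
  if strand1.length > 0 ∧ strand2.length > 0 then true else false

def strandsAreEqualLengths (strand1 strand2 : List Char) : Bool :=
  if strand1.length = strand2.length then true else false

-- the for-loop over i in range(len(target)); target[i:] = drop i and candidate[0:L] = take L
-- are exact here because i and L are nonnegative (i ranges over 0..n-1, L = len(tarslice) ≥ 0)
def findLoopA (t c : List Char) : List Nat → Int
  | [] => 0
  | i :: rest =>
    let tarslice := t.drop i
    let canslice := c.take tarslice.length
    if tarslice = canslice then (tarslice.length : Int) else findLoopA t c rest

def findLargestOverlap (target : String) (candidate : String) : Int :=
  if strandsAreEqualLengths target.toList candidate.toList ≠ true ∨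
      strandsAreNotEmpty target.toList candidate.toList ≠ true then -1
  else findLoopA target.toList candidate.toList (List.range target.toList.length)

-- ===== PORT B =====
-- the inner `while k > 0 and s[i] != s[k]` loop; k strictly decreases each iteration,
-- so running it with fuel = the starting k is exact; s[i]/s[k] indices are in range,
-- so getD is exact (the default is never used)
def kmpFall (s : List Char) (pi : List Nat) (x : Char) : Nat → Nat → Nat
  | 0, k => k
  | fuel + 1, k =>
    if 0 < k ∧ x ≠ s.getD k (Char.ofNat 0) then kmpFall s pi x fuel (pi.getD (k - 1) 0)
    else k

-- for i in range(1, len(s)); pi is built by appending pi[i] = k each round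
-- (Python preallocates [0]*len(s), but slots ≥ i are never read before being set)
def kmpLoop (s : List Char) : List Nat → List Nat → Nat → Nat
  | [], _, k => k
  | i :: rest, pi, k =>
    let k1 := kmpFall s pi (s.getD i (Char.ofNat 0)) k k
    let k2 := if s.getD i (Char.ofNat 0) = s.getD k1 (Char.ofNat 0) then k1 + 1 else k1
    kmpLoop s rest (pi ++ [k2]) k2

def findLargestOverlap_alt (target : String) (candidate : String) : Int :=
  let t := target.toList
  let c := candidate.toList
  if t.length ≠ c.length ∨ t.length = 0 then -1
  else
    let s := c ++ [Char.ofNat 0] ++ t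
    ((kmpLoop s (List.range' 1 (s.length - 1)) [0] 0 : Nat) : Int)

-- ===== PRECONDITION & SPEC =====
def Spec_findLargestOverlap (target : String) (candidate : String) (out : Int) : Prop := out = findLargestOverlap_alt target candidate
instance (target : String) (candidate : String) (out : Int) : Decidable (Spec_findLargestOverlap target candidate out) := by unfold Spec_findLargestOverlap; infer_instance

-- ===== CLAIM (what is proved, stated in full; the proofs are below) =====
def Claim_equal_findLargestOverlap : Prop := ∀ (target : String) (candidate : String), Dom_findLargestOverlap target candidate → Spec_findLargestOverlap target candidate (findLargestOverlap target candidate)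

-- ===== LEMMAS AND PROOFS =====

-- `Border w j`: the prefix of `w` of length `j` equals its suffix of length `j`, `j` proper
abbrev Border (w : List Char) (j : Nat) : Prop :=
  j < w.length ∧ w.take j = w.drop (w.length - j)

-- longest proper border length
def lbp (w : List Char) : Nat := Nat.findGreatest (Border w) (w.length - 1)

theorem border_zero {w : List Char} (hw : w ≠ []) : Border w 0 := by
  constructor
  · exact List.length_pos_iff.mpr hw
  · simp

theorem lbp_lt {w : List Char} (hw : w ≠ []) : lbp w < w.length := by
  have h1 : 0 < w.length := List.length_pos_iff.mpr hw
  have := Nat.findGreatest_le (P := Border w) (w.length - 1)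
  unfold lbp; omega

theorem border_lbp {w : List Char} (hw : w ≠ []) : Border w (lbp w) :=
  Nat.findGreatest_spec (P := Border w) (Nat.zero_le _) (border_zero hw)

theorem le_lbp {w : List Char} {j : Nat} (hj : Border w j) : j ≤ lbp w :=
  Nat.le_findGreatest (by omega) hj

-- borders of a border are exactly the smaller borders of the word
theorem border_take_iff {w : List Char} {k j : Nat} (hk : Border w k) (hjk : j < k) :
    Border (w.take k) j ↔ Border w j := by
  obtain ⟨hklen, hkeq⟩ := hk
  have hlen : (w.take k).length = k := by simp; omega
  have hdrop : (w.take k).drop (k - j) = w.drop (w.length - j) := by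
    rw [hkeq, List.drop_drop]
    congr 1
    omega
  constructor
  · rintro ⟨-, h⟩
    refine ⟨by omega, ?_⟩
    rw [List.take_take, min_eq_left (by omega)] at h
    rw [h, hlen] at *
    rw [← hdrop]
  · rintro ⟨-, h⟩
    refine ⟨by omega, ?_⟩
    rw [hlen, List.take_take, min_eq_left (by omega), hdrop]
    exact h

-- extension lemma: borders of w ++ [x] of positive length
theorem border_snoc_iff {w : List Char} {x : Char} {j : Nat} (hj : j < w.length) :
    Border (w ++ [x]) (j + 1) ↔ (Border w j ∧ w.getD j (Char.ofNat 0) = x) := by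
  have hj1 : j + 1 ≤ w.length := hj
  have hget : w.getD j (Char.ofNat 0) = w[j] := List.getD_eq_getElem _ _ hj
  have htake : w.take (j + 1) = w.take j ++ [w[j]] := by
    rw [List.take_add_one, List.getElem?_eq_getElem hj]; rfl
  have hL : (w ++ [x]).length - (j + 1) = w.length - j := by simp
  have hdrop : (w ++ [x]).drop ((w ++ [x]).length - (j + 1)) =
      w.drop (w.length - j) ++ [x] := by
    rw [hL, List.drop_append_of_le_length (by omega)]
  constructor
  · rintro ⟨-, h⟩
    rw [List.take_append_of_le_length hj1, hdrop, htake] at h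
    obtain ⟨h1, h2⟩ := List.append_inj' h (by simp)
    refine ⟨⟨hj, h1⟩, ?_⟩
    rw [hget]
    simpa using h2
  · rintro ⟨⟨-, hb⟩, hx⟩
    refine ⟨by simp; omega, ?_⟩
    rw [List.take_append_of_le_length hj1, hdrop, htake, hb, ← hget, hx]

-- findGreatest is unchanged when the predicate fails strictly above a
theorem findGreatest_shrink {P : Nat → Prop} [DecidablePred P] {a b : Nat} (hab : a ≤ b)
    (h : ∀ j, a < j → j ≤ b → ¬ P j) : Nat.findGreatest P b = Nat.findGreatest P a := by
  induction b with
  | zero => obtain rfl : a = 0 := Nat.le_zero.mp hab; rfl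
  | succ n ih =>
    rcases Nat.eq_or_lt_of_le hab with rfl | hlt
    · rfl
    · rw [Nat.findGreatest_of_not (h _ hlt (le_refl _))]
      exact ih (by omega) (fun j h1 h2 => h j h1 (by omega))

-- findGreatest respects pointwise equivalence below the bound
theorem findGreatest_congr {P Q : Nat → Prop} [DecidablePred P] [DecidablePred Q] {b : Nat}
    (h : ∀ j, j ≤ b → (P j ↔ Q j)) : Nat.findGreatest P b = Nat.findGreatest Q b := by
  induction b with
  | zero => rfl
  | succ n ih =>
    rw [Nat.findGreatest_succ, Nat.findGreatest_succ, ih (fun j hj => h j (by omega))]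
    by_cases hp : P (n + 1)
    · rw [if_pos hp, if_pos ((h _ (le_refl _)).mp hp)]
    · rw [if_neg hp, if_neg (fun hq => hp ((h _ (le_refl _)).mpr hq))]

-- the fall loop walks the border chain and finds the largest matching border
theorem kmpFall_eq (s : List Char) (pi : List Nat) (x : Char) (w : List Char)
    (hag : ∀ j, j < w.length → s.getD j (Char.ofNat 0) = w.getD j (Char.ofNat 0))
    (hpi : ∀ j, j + 1 < w.length → pi.getD j 0 = lbp (w.take (j + 1))) :
    ∀ fuel k, k ≤ fuel → Border w k →
      kmpFall s pi x fuel k =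
        Nat.findGreatest (fun j => Border w j ∧ w.getD j (Char.ofNat 0) = x) k := by
  intro fuel
  induction fuel with
  | zero =>
    intro k hk _
    obtain rfl : k = 0 := Nat.le_zero.mp hk
    simp [kmpFall]
  | succ fuel ih =>
    intro k hk hB
    by_cases hc : 0 < k ∧ x ≠ s.getD k (Char.ofNat 0)
    · obtain ⟨hk0, hne⟩ := hc
      have hklen : k < w.length := hB.1
      have hxw : x ≠ w.getD k (Char.ofNat 0) := by rwa [hag k hklen] at hne
      have htk_len : (w.take k).length = k := by simp; omega
      have htk_ne : w.take k ≠ [] := by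
        intro h; rw [h] at htk_len; simp at htk_len; omega
      have hk'lt : lbp (w.take k) < k := by
        have := lbp_lt htk_ne; omega
      have hB' : Border w (lbp (w.take k)) :=
        (border_take_iff hB hk'lt).mp (border_lbp htk_ne)
      have hpik : pi.getD (k - 1) 0 = lbp (w.take k) := by
        have := hpi (k - 1) (by omega)
        rwa [Nat.sub_add_cancel hk0] at this
      rw [kmpFall, if_pos ⟨hk0, hne⟩, hpik,
        ih (lbp (w.take k)) (by omega) hB']
      refine (findGreatest_shrink (by omega) ?_).symm
      rintro j h1 h2 ⟨hBj, hxj⟩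
      rcases Nat.eq_or_lt_of_le h2 with rfl | hjk
      · exact hxw hxj.symm
      · have : j ≤ lbp (w.take k) := le_lbp ((border_take_iff hB hjk).mpr hBj)
        omega
    · rw [kmpFall, if_neg hc]
      push Not at hc
      rcases Nat.eq_zero_or_pos k with rfl | hk0
      · simp
      · have hklen : k < w.length := hB.1
        have hx : w.getD k (Char.ofNat 0) = x := by rw [← hag k hklen, ← hc hk0]
        exact (Nat.findGreatest_eq ⟨hB, hx⟩).symm

-- one round of the main loop computes the longest proper border of w ++ [x]
theorem kmp_step (s : List Char) (pi : List Nat) (x : Char) (w : List Char) (hw : w ≠ [])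
    (hag : ∀ j, j < w.length → s.getD j (Char.ofNat 0) = w.getD j (Char.ofNat 0))
    (hpi : ∀ j, j + 1 < w.length → pi.getD j 0 = lbp (w.take (j + 1))) :
    (if x = s.getD (kmpFall s pi x (lbp w) (lbp w)) (Char.ofNat 0)
      then kmpFall s pi x (lbp w) (lbp w) + 1
      else kmpFall s pi x (lbp w) (lbp w)) = lbp (w ++ [x]) := by
  have hfall := kmpFall_eq s pi x w hag hpi (lbp w) (lbp w) (le_refl _) (border_lbp hw)
  set P : Nat → Prop := fun j => Border w j ∧ w.getD j (Char.ofNat 0) = x with hP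
  set k1 := kmpFall s pi x (lbp w) (lbp w) with hk1def
  have hk1 : k1 = Nat.findGreatest P (lbp w) := hfall
  have hk1le : k1 ≤ lbp w := by rw [hk1]; exact Nat.findGreatest_le _
  have hk1lt : k1 < w.length := lt_of_le_of_lt hk1le (lbp_lt hw)
  have hsk1 : s.getD k1 (Char.ofNat 0) = w.getD k1 (Char.ofNat 0) := hag _ hk1lt
  have hsnoc_ne : w ++ [x] ≠ [] := by simp
  by_cases hx : x = w.getD k1 (Char.ofNat 0)
  · rw [if_pos (by rw [hsk1]; exact hx)]
    have hPk1 : P k1 := by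
      rcases Nat.eq_zero_or_pos k1 with h0 | h0
      · have hx0 := hx
        rw [h0] at hx0
        rw [h0]
        exact ⟨border_zero hw, hx0.symm⟩
      · exact Nat.findGreatest_of_ne_zero hk1.symm (by omega)
    refine le_antisymm ?_ ?_
    · -- k1 + 1 ≤ lbp (w ++ [x])
      exact le_lbp ((border_snoc_iff hk1lt).mpr ⟨hPk1.1, hPk1.2⟩)
    · -- lbp (w ++ [x]) ≤ k1 + 1
      rcases Nat.eq_zero_or_pos (lbp (w ++ [x])) with hL0 | hL0
      · omega
      · have hBL := border_lbp hsnoc_ne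
        have hLlt : lbp (w ++ [x]) < w.length + 1 := by
          have := lbp_lt hsnoc_ne; simpa using this
        obtain ⟨j, hLj⟩ : ∃ j, lbp (w ++ [x]) = j + 1 :=
          ⟨lbp (w ++ [x]) - 1, by omega⟩
        rw [hLj] at hBL
        obtain ⟨hBj, hxj⟩ := (border_snoc_iff (by omega)).mp hBL
        have : j ≤ Nat.findGreatest P (lbp w) :=
          Nat.le_findGreatest (le_lbp hBj) ⟨hBj, hxj⟩
        omega
  · rw [if_neg (by rw [hsk1]; exact hx)]
    have hk10 : k1 = 0 := by
      by_contra h0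
      exact hx (Nat.findGreatest_of_ne_zero hk1.symm h0).2.symm
    rw [hk10]
    rcases Nat.eq_zero_or_pos (lbp (w ++ [x])) with hL0 | hL0
    · omega
    · exfalso
      have hBL := border_lbp hsnoc_ne
      obtain ⟨j, hLj⟩ : ∃ j, lbp (w ++ [x]) = j + 1 :=
        ⟨lbp (w ++ [x]) - 1, by omega⟩
      rw [hLj] at hBL
      have hLlt : lbp (w ++ [x]) < w.length + 1 := by
        have := lbp_lt hsnoc_ne; simpa using this
      obtain ⟨hBj, hxj⟩ := (border_snoc_iff (by omega)).mp hBL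
      have hj0 : j = 0 := by
        have : j ≤ Nat.findGreatest P (lbp w) :=
          Nat.le_findGreatest (le_lbp hBj) ⟨hBj, hxj⟩
        omega
      rw [hj0] at hxj
      apply hx
      rw [hk10]
      exact hxj.symm

-- main loop invariant
theorem kmpLoop_eq (s : List Char) :
    ∀ (d i : Nat) (pi : List Nat) (k : Nat), 1 ≤ i → i + d = s.length →
      pi.length = i → (∀ j, j < i → pi.getD j 0 = lbp (s.take (j + 1))) →
      k = lbp (s.take i) →
      kmpLoop s (List.range' i d) pi k = lbp s := by
  intro d
  induction d with
  | zero =>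
    intro i pi k h1 h2 h3 h4 h5
    have hi : i = s.length := by omega
    simp only [List.range'_zero, kmpLoop]
    rw [h5, hi, List.take_length]
  | succ d ih =>
    intro i pi k h1 h2 h3 h4 h5
    rw [List.range'_succ]
    simp only [kmpLoop]
    set w := s.take i with hwdef
    have hilt : i < s.length := by omega
    have hwlen : w.length = i := by simp [hwdef]; omega
    have hw : w ≠ [] := by
      intro h; rw [h] at hwlen; simp at hwlen; omega
    have hag : ∀ j, j < w.length → s.getD j (Char.ofNat 0) = w.getD j (Char.ofNat 0) := by
      intro j hj
      rw [hwlen] at hj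
      rw [List.getD_eq_getElem _ _ (by omega : j < s.length),
        List.getD_eq_getElem _ _ (by rw [hwlen]; exact hj)]
      exact (List.getElem_take).symm
    have hpi' : ∀ j, j + 1 < w.length → pi.getD j 0 = lbp (w.take (j + 1)) := by
      intro j hj
      rw [hwlen] at hj
      rw [h4 j (by omega), hwdef, List.take_take, min_eq_left (by omega)]
    have hstep := kmp_step s pi (s.getD i (Char.ofNat 0)) w hw hag hpi'
    have hwx : w ++ [s.getD i (Char.ofNat 0)] = s.take (i + 1) := by
      rw [List.take_add_one, List.getElem?_eq_getElem hilt, hwdef,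
        List.getD_eq_getElem _ _ hilt]
      rfl
    rw [h5, hstep, hwx]
    refine ih (i + 1) _ _ (by omega) (by omega) (by simp [h3]) ?_ rfl
    intro j hj
    rcases Nat.lt_or_ge j i with hji | hji
    · rw [List.getD_append _ _ _ _ (by rw [h3]; exact hji)]
      exact h4 j hji
    · have hji' : j = i := by omega
      rw [hji', List.getD_append_right _ _ _ _ (by rw [h3]), h3]
      simp

-- borders of c ++ [NUL] ++ t no longer than |t| are exactly the overlaps
theorem borderS_low {t c : List Char} (hn : c.length = t.length) {j : Nat}
    (hj : j ≤ t.length) :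
    Border (c ++ [Char.ofNat 0] ++ t) j ↔ t.drop (t.length - j) = c.take j := by
  rw [List.append_assoc]
  have hlen : (c ++ ([Char.ofNat 0] ++ t)).length = 2 * t.length + 1 := by simp; omega
  have h1 : (c ++ ([Char.ofNat 0] ++ t)).take j = c.take j :=
    List.take_append_of_le_length (by omega)
  have h2 : (c ++ ([Char.ofNat 0] ++ t)).drop ((c ++ ([Char.ofNat 0] ++ t)).length - j)
      = t.drop (t.length - j) := by
    rw [List.drop_append, List.drop_eq_nil_of_le (by omega), List.nil_append]
    have : (c ++ ([Char.ofNat 0] ++ t)).length - j - c.length = (t.length - j) + 1 := by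
      rw [hlen]; omega
    rw [this, List.singleton_append, List.drop_succ_cons]
  constructor
  · rintro ⟨-, h⟩
    rw [h1, h2] at h
    exact h.symm
  · intro h
    exact ⟨by rw [hlen]; omega, by rw [h1, h2]; exact h.symm⟩

-- the NUL separator kills every longer border
theorem borderS_high {t c : List Char} (hn : c.length = t.length)
    (hsep : Char.ofNat 0 ∉ t) {j : Nat} (hj1 : t.length < j) :
    ¬ Border (c ++ [Char.ofNat 0] ++ t) j := by
  rw [List.append_assoc, List.singleton_append]
  rintro ⟨hjlen, heq⟩
  have hlen : (c ++ Char.ofNat 0 :: t).length = 2 * t.length + 1 := by simp; omega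
  rw [hlen] at hjlen
  have l1 : ((c ++ Char.ofNat 0 :: t).take j).length = j := by simp [hlen]; omega
  have hnlt : t.length < ((c ++ Char.ofNat 0 :: t).take j).length := by
    rw [l1]; exact hj1
  have key := List.getElem_of_eq heq hnlt
  rw [List.getElem_take, List.getElem_drop] at key
  have e1 : (c ++ Char.ofNat 0 :: t)[t.length]'(by rw [hlen]; omega) = Char.ofNat 0 := by
    rw [List.getElem_append_right hn.le]
    simp [hn]
  have e2 : (c ++ Char.ofNat 0 :: t)[(c ++ Char.ofNat 0 :: t).length - j + t.length]'
      (by rw [hlen]; omega) = t[2 * t.length - j]'(by omega) := by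
    rw [List.getElem_append_right (by rw [hlen]; omega)]
    have hidx : (c ++ Char.ofNat 0 :: t).length - j + t.length - c.length =
        (2 * t.length - j) + 1 := by rw [hlen]; omega
    simp only [hidx]
    exact List.getElem_cons_succ ..
  rw [e1, e2] at key
  exact hsep (key ▸ List.getElem_mem _)

-- A's loop returns the largest overlap among the lengths it still scans
theorem findLoopA_eq (t c : List Char) :
    ∀ (d i : Nat), i + d = t.length →
      findLoopA t c (List.range' i d) =
        ((Nat.findGreatest (fun k => t.drop (t.length - k) = c.take k) d : Nat) : Int) := by
  intro d
  induction d with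
  | zero => intro i _; simp [findLoopA]
  | succ d ih =>
    intro i hi
    rw [List.range'_succ, findLoopA]
    have hdl : (t.drop i).length = d + 1 := by simp; omega
    have hni : t.length - (d + 1) = i := by omega
    by_cases h : t.drop i = c.take (t.drop i).length
    · rw [if_pos h, hdl]
      rw [hdl] at h
      have : Nat.findGreatest (fun k => t.drop (t.length - k) = c.take k) (d + 1) = d + 1 :=
        Nat.findGreatest_eq (by rw [hni]; exact h)
      rw [this]
    · rw [if_neg h, ih (i + 1) (by omega),
        Nat.findGreatest_of_not (by rw [hni]; rw [hdl] at h; exact h)]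

theorem sep_not_mem {s : String} (h : pvDomStr s = true) : Char.ofNat 0 ∉ s.toList := by
  intro hm
  have := List.all_eq_true.mp h _ hm
  exact absurd this (by decide)

-- ===== VERDICT (by name: the statement is the Claim_ definition above) =====
theorem findLargestOverlap_spec : Claim_equal_findLargestOverlap := by
  intro target candidate hdom
  unfold Spec_findLargestOverlap findLargestOverlap findLargestOverlap_alt
  obtain ⟨hdt, hdc⟩ := Bool.and_eq_true_iff.mp hdom
  have hsep : Char.ofNat 0 ∉ target.toList := sep_not_mem hdt
  set t := target.toList with ht
  set c := candidate.toList with hc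
  by_cases h1 : t.length = c.length
  · by_cases h2 : t.length = 0
    · have hc0 : c.length = 0 := by omega
      simp [strandsAreEqualLengths, strandsAreNotEmpty, h1, hc0]
    · have hA1 : strandsAreEqualLengths t c = true := by
        simp [strandsAreEqualLengths, h1]
      have hA2 : strandsAreNotEmpty t c = true := by
        have : 0 < t.length := by omega
        simp [strandsAreNotEmpty]
        omega
      rw [if_neg (by simp [hA1, hA2]), if_neg (by omega)]
      -- B's side
      set s : List Char := c ++ [Char.ofNat 0] ++ t with hs
      have hslen : s.length = 2 * t.length + 1 := by simp [hs]; omega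
      have hlbp1 : lbp (s.take 1) = 0 := by
        have hl : (s.take 1).length = 1 := by simp [hslen]
        unfold lbp
        exact Nat.findGreatest_eq_zero_iff.mpr (fun n hn hnb => by intro _; omega)
      have hB : kmpLoop s (List.range' 1 (s.length - 1)) [0] 0 = lbp s := by
        refine kmpLoop_eq s (s.length - 1) 1 [0] 0 (le_refl 1) (by omega) rfl ?_ hlbp1.symm
        intro j hj
        obtain rfl : j = 0 := by omega
        simpa using hlbp1.symm
      have hchain : lbp s =
          Nat.findGreatest (fun k => t.drop (t.length - k) = c.take k) t.length := by
        unfold lbp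
        rw [show s.length - 1 = 2 * t.length by omega,
          findGreatest_shrink (a := t.length) (by omega)
            (fun j hj1 _ => borderS_high h1.symm hsep hj1)]
        exact findGreatest_congr (fun j hj => borderS_low h1.symm hj)
      show findLoopA t c (List.range t.length) =
        ((kmpLoop s (List.range' 1 (s.length - 1)) [0] 0 : Nat) : Int)
      rw [List.range_eq_range', findLoopA_eq t c t.length 0 (by omega), hB, hchain]
  · rw [if_pos (by simp [strandsAreEqualLengths]; omega), if_pos (by omega)]
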